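/-
  LEMMAS FOR THE WORKERS OF get_bits (both stages) AND prep_huffman — written by the validator of the unit `get_bits.24` while
  proving against the statement; pure facts about the 32-bit arithmetic of the bit reader and about `Bits` / μ / `valid_bits`
  through the stores these functions make. Not used by any statement.

      arg_toInt            the `int n` argument as the signed value the compares see, for n ≤ 24
      reader_of_window     `Bits`, μ AND `valid_bits` through stores inside one window off `*f` (Reader.reader_of_window + valid_bits)
      stack_store / four_pushes / acc_store / vb_store / three_stores / eop_stores      the same through the functions' own stores
      vb_add8 / vb_sub     `valid_bits += 8`, `valid_bits -= n` in the walker's forms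
      take_result          the extraction `acc & ((1 << n) − 1)` in the walker's form is a `GetBitsResult n`
      ofBV32_toNat         a 32-bit result zero-extended into rax

  namespace Vorbis.Spec.GetBits — from the validator of the unit `get_bits` (stage 2), which PROVED the unit with them:
      reuse_at             a contract applied at ONE entry state for a Spec with a bigger frame and the same windows (the n ≤ 24 case of
                           stage 2 is the stage-1 contract at the same state; `Calls.weaken` needs the implication for ALL states). Candidate
                           for UserX/Contract.lean as `Calls.weaken_at`: every two-stage unit needs it
      obj_same             `Bits`, μ, `valid_bits` through a change of memory outside `*f`
      post_of_entry_same   a callee's `GetBitsPost` stated from ITS entry memory, moved to the caller's memory (equal on `*f`)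
      post_eop / post_take the two non-recursive exits of get_bits (both stages): `valid_bits < 0`; the extraction
      combine_toNat        `shl eax, 0x18 ; add eax, ebp` in the walker's form = the left side of `get_bits_combine_machine`
      part32_toInt msb_ofNat32 ofBV32_toNat sub_toInt spans_sub      word and span facts

  namespace Vorbis.Spec.ByteReader — from the validator of the unit `getn`, which PROVED the unit with them (skip needs the same):
      part32_toInt / sx32_eq_word / sx32_toInt     an `int` argument (`argInt`) as the walker has it: the signed low half, `movsxd r64, r32`, the signed `cmp`
      sub_toInt            the signed side of `cmp r14, r12` for a pointer difference (`addr_sub_addr` alone does not reach the `jle` fact)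
      calls_keep           = Reader.calls_remember (a contract that carries a fact of its entry state to its post)
      bits_stream_moved    the FOUR-WINDOW form (`[56,72) [1488,1492) [1748,1756) [1768,1772)` unchanged): serves get8, getn (destination inside
                           `segments[]`), skip, capture_pattern alike; Reader.bits_stream_moved is the one-window form

  namespace Vorbis.Spec.PacketRaw — from the validator of the unit `get8_packet_raw`, which PROVED the unit with them:
      bitsSame_of_footprint   `valid_bits`, `acc` unchanged from the `same` clause alone (stack window off `*f` + winsRaw): also flush_packet's `bitsSame`
      of_pushes               Reader.reader_of_window + `bytes_in_seg`
      dec_chain               Lemma μ case a at memory level: `--bytes_in_seg; ++packet_bytes` with the two return-address pushes in between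
      dec_byte_val            the value `movzx eax, byte ; sub eax, 1 ; mov [..], al` stores
      movzx8_lt               `movzx eax, al` after a callee: every `return get8(f)`

  namespace Vorbis.Spec.Paging — from the validator of the units `start_page` and `start_packet`, which PROVED both with them:
      reader_of_footprint     `ReaderPost` and `next_seg` through a MULTI-window footprint whose windows are off `*f` or inside `eof` + `error`: the callee
                              footprint of `error` (every reader that calls error), pushes
      push_off_obj            Reader.store_off_obj + `next_seg`
      next_seg_test           the branch fact of `cmp DWORD PTR [rbx+0x6d8], -1` in the walker's form (start_packet, maybe_start_packet)
      after_stores            the exit of start_packet from what the FINAL memory reads (EqOn + readLE facts): `Bits` / μ in a pure lemma, no per-store conversion of addresses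

  namespace Vorbis.Spec.PrepHuffman — from the validator of the unit `prep_huffman`, which PROVED the unit with them:
      obj_same                `Bits`, μ, `valid_bits` AND `acc` through a change of memory outside `*f` (GetBits.obj_same + `acc`: prefer this one)
      acc_store_over          the `acc = 0` store over the pushes
      vb_add8                 `add ecx, 8` with m ≤ 24 (BitReader.vb_add8 is the `lea` form with m < 24)
      vb_cases                the 32-bit load of `valid_bits` against the signed field: every branch on `valid_bits`

  namespace Vorbis.Spec.Segment — from the validator of the unit `next_segment`, which PROVED the unit with them:
      segment_post            next_segment's segment read AS THE MACHINE DOES IT (stores `old + 1`, then `−1` when `segment_count ≤ old + 1`: N2 is transiently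
                              violated, so `Bits.store_next_seg` does not apply): `Bits`, μ strictly smaller, `bytes_in_seg` for the FINAL memory
      kept_of_sameExcept      `Bits`, μ, `next_seg`, `bytes_in_seg` through any footprint off the windows `Bits` and μ read (generalises Reader.reader_of_window)
      bytes_in_seg_of_sameExcept · next_seg_of_read / last_seg_of_read / bytes_in_seg_of_read (the walker's load → the typed accessor)
      part32_addr ofBV_ofNat32 sx_ofNat32 setWidth_succ zx8_ofNat low8_ofNat part8_addr toInt_small      small numbers in the walker's bit-vector forms (index `movsxd`, the byte)
      rax_of_test ofBV_part32_zero      what `test eax, eax` says of a result in {0, 1}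
      spans_sub               the `hsub` premise of SameExcept.step_same / .mono from InSpans facts

  namespace Vorbis.Spec.MaybeStart — from the validator of the unit `maybe_start_packet`, which PROVED the unit with them:
      reader_through          `Bits` and μ through any footprint that misses the windows `Bits` and μ read
      reader_through_error    the same for the callee footprint of `error` (`[⟨lo, hi⟩, ⟨f + 140, f + 140 + 4⟩]`): EVERY reader that calls error
      reader_through_own      maybe_start_packet's own two stores (last_seg, bytes_in_seg := 0) in footprint form, with interleaved return-address pushes
      widen · next_seg_kept · mu_page_arm (the pure arithmetic of the page arm) · own_stores (nest form)
-/
import Vorbis.Spec.Reader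
import Asan.CheckWalk

open X86 X86.User Asan Vorbis

set_option maxRecDepth 4000
set_option maxHeartbeats 4000000

namespace Vorbis.Spec.BitReader

/-- The `int n` of get_bits in `r12d`, as a signed number: with `n ≤ 24` it is the unsigned reading. -/
theorem arg_toInt (x : Word) (h : x.toNat % 2 ^ 32 ≤ 24) :
    (Word.part Width.w32 x).toInt = ((x.toNat % 2 ^ 32 : Nat) : Int) := by
  rw [BitVec.toInt_eq_toNat_cond, Asan.part32_toNat]
  simp only [Width.bits]
  split
  · rfl
  · omega

/-- Stores that all lie in ONE window off `*f` (the function's own pushes, the return address of a call) keep `Bits f`, μ and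
`valid_bits`. -/
theorem reader_of_window {Blk : Block → Prop} {len : Nat} {mem mem' : Mem} {f lo hi : Nat} (h : Bits Blk len mem f)
    (hs : Mem.SameExcept [⟨lo, hi⟩] mem mem') (hoff : hi ≤ f ∨ f + 1808 ≤ lo) :
    Bits Blk len mem' f ∧ mu mem' f = mu mem f ∧ stb_vorbis.valid_bits mem' f = stb_vorbis.valid_bits mem f := by
  have hr := h.OBR
  have hsame : ObjSame f mem mem' := by
    apply ObjSame.of_sameExcept hs (by omega)
    intro w hw
    have e : w = ⟨lo, hi⟩ := List.mem_singleton.mp hw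
    subst e
    simp only []
    omega
  refine ⟨h.frame hsame, mu_transfer (hsame.sub (by decide)), ?_⟩
  have he : ObjEq Bits.wins mem f mem' f := hsame.sub (by decide)
  simp only [vacc, voff]
  exact he.i32 1768 (by decide)

/-- `lea eax, [rcx + 8]` on a small `valid_bits`: no wrap. -/
theorem vb_add8 : ∀ m : Nat, m < 24 →
    (BitVec.setWidth 32 (Word.ofBV (BitVec.ofNat 32 m) + 8).toBitVec).toInt = (m : Int) + 8 := by
  decide

/-- A 32-bit value as a word, as a number. -/
theorem ofBV32_toNat (v : BitVec 32) : (Word.ofBV v).toNat = v.toNat := by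
  unfold Word.ofBV
  rw [UInt64.toNat_ofBitVec, BitVec.toNat_setWidth]
  have := v.isLt
  omega

/-- `sub edx, r12d` with `0 ≤ n ≤ valid_bits ≤ 32`: no wrap. -/
theorem vb_sub (x N : BitVec 32) (n : Nat) (hN : N.toNat = n) (hx0 : (n : Int) ≤ x.toInt) (hx1 : x.toInt ≤ 32) :
    (x - N).toInt = x.toInt - (n : Int) := by
  have hxl := x.isLt
  have hxI := BitVec.toInt_eq_toNat_cond x
  have hyI := BitVec.toInt_eq_toNat_cond (x - N)
  rw [BitVec.toNat_sub, hN] at hyI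
  split at hxI <;> split at hyI <;> omega

/-- The result of the extraction `acc & ((1 << n) - 1)`, `n ≤ 24`. -/
theorem take_result (N X : BitVec 32) (n : Nat) (hN : N.toNat = n) (hn : n ≤ 24) :
    GetBitsResult n (Word.ofBV (1#32 <<< ((BitVec.setWidth 8 N).toNat % 32) - 1#32 &&& X)).toNat := by
  have e : (BitVec.setWidth 8 N).toNat % 32 = n := by
    rw [BitVec.toNat_setWidth, hN]
    omega
  rw [e, ofBV32_toNat]
  constructor
  · exact BitVec.isLt _
  · intro _
    exact mask_and_lt X n (by omega)

/-- One store below or above `*f` (a push, the return address of a call): `Bits`, μ, `valid_bits` kept. -/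
theorem stack_store {Blk : Block → Prop} {len : Nat} {M : Mem} {f : Nat} (h : Bits Blk len M f) (sp : Word) (r : Nat)
    (hlt : sp.toNat + 8 < 2 ^ 64) (hsp : sp.toNat + 8 ≤ f ∨ f + 1808 ≤ sp.toNat) :
    Bits Blk len (M.writeLE sp 8 r) f ∧ mu (M.writeLE sp 8 r) f = mu M f ∧
      stb_vorbis.valid_bits (M.writeLE sp 8 r) f = stb_vorbis.valid_bits M f := by
  have hw : Mem.SameExcept [⟨sp.toNat, sp.toNat + 8⟩] M (M.writeLE sp 8 r) :=
    Mem.SameExcept.step_writeLE' sp 8 r (Mem.SameExcept.refl _ M) hlt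
      ⟨⟨sp.toNat, sp.toNat + 8⟩, List.mem_singleton.mpr rfl, Nat.le_refl _, Nat.le_refl _⟩
  exact reader_of_window h hw (by omega)

/-- The store of `acc`: `Bits`, μ, `valid_bits` kept. -/
theorem acc_store {Blk : Block → Prop} {len : Nat} {M : Mem} {f : Nat} (h : Bits Blk len M f) (A : Nat) :
    Bits Blk len (M.writeLE (addr (f + 1764)) 4 A) f ∧ mu (M.writeLE (addr (f + 1764)) 4 A) f = mu M f ∧
      stb_vorbis.valid_bits (M.writeLE (addr (f + 1764)) 4 A) f = stb_vorbis.valid_bits M f :=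
  ⟨h.store_other 1764 4 A (by omega) (by omega) (by omega) (by omega) (by omega),
    h.mu_store_other 1764 4 A (by omega) (by omega) (by omega) (by omega) (by omega) (by omega),
    (h.fields_store 1764 4 A (by omega)).valid_bits (by omega)⟩

/-- The store of `valid_bits` (a value within V1): `Bits` again, μ kept, the new value. -/
theorem vb_store {Blk : Block → Prop} {len : Nat} {M : Mem} {f : Nat} (h : Bits Blk len M f) (x : BitVec 32)
    (hx : -1 ≤ x.toInt ∧ x.toInt ≤ 32) :
    Bits Blk len (M.writeLE (addr (f + 1768)) 4 x.toNat) f ∧ mu (M.writeLE (addr (f + 1768)) 4 x.toNat) f = mu M f ∧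
      stb_vorbis.valid_bits (M.writeLE (addr (f + 1768)) 4 x.toNat) f = x.toInt :=
  ⟨(h.store_valid_bits x hx).1,
    h.mu_store_other 1768 4 x.toNat (by omega) (by omega) (by omega) (by omega) (by omega) (by omega),
    (h.store_valid_bits x hx).2⟩

/-- The four pushes of the prologue: `Bits`, μ, `valid_bits` kept. -/
theorem four_pushes {Blk : Block → Prop} {len : Nat} {M : Mem} {f : Nat} (h : Bits Blk len M f) (p1 p2 p3 p4 : Word)
    (r1 r2 r3 r4 : Nat) (l1 : p1.toNat + 8 < 2 ^ 64) (l2 : p2.toNat + 8 < 2 ^ 64) (l3 : p3.toNat + 8 < 2 ^ 64)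
    (l4 : p4.toNat + 8 < 2 ^ 64) (d1 : p1.toNat + 8 ≤ f ∨ f + 1808 ≤ p1.toNat) (d2 : p2.toNat + 8 ≤ f ∨ f + 1808 ≤ p2.toNat)
    (d3 : p3.toNat + 8 ≤ f ∨ f + 1808 ≤ p3.toNat) (d4 : p4.toNat + 8 ≤ f ∨ f + 1808 ≤ p4.toNat) :
    Bits Blk len ((((M.writeLE p1 8 r1).writeLE p2 8 r2).writeLE p3 8 r3).writeLE p4 8 r4) f ∧
      mu ((((M.writeLE p1 8 r1).writeLE p2 8 r2).writeLE p3 8 r3).writeLE p4 8 r4) f = mu M f ∧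
      stb_vorbis.valid_bits ((((M.writeLE p1 8 r1).writeLE p2 8 r2).writeLE p3 8 r3).writeLE p4 8 r4) f =
        stb_vorbis.valid_bits M f := by
  have k1 := stack_store h p1 r1 l1 d1
  have k2 := stack_store k1.1 p2 r2 l2 d2
  have k3 := stack_store k2.1 p3 r3 l3 d3
  have k4 := stack_store k3.1 p4 r4 l4 d4
  exact ⟨k4.1, k4.2.1.trans (k3.2.1.trans (k2.2.1.trans k1.2.1)), k4.2.2.trans (k3.2.2.trans (k2.2.2.trans k1.2.2))⟩

/-- The three stores of a round of the loop and of the extraction: a return address on the stack, `acc`, `valid_bits`. -/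
theorem three_stores {Blk : Block → Prop} {len : Nat} {M : Mem} {f : Nat} (h : Bits Blk len M f) (sp : Word) (r : Nat)
    (hlt : sp.toNat + 8 < 2 ^ 64) (hsp : sp.toNat + 8 ≤ f ∨ f + 1808 ≤ sp.toNat) (A : Nat) (x : BitVec 32)
    (hx : -1 ≤ x.toInt ∧ x.toInt ≤ 32) :
    Bits Blk len (((M.writeLE sp 8 r).writeLE (addr (f + 1764)) 4 A).writeLE (addr (f + 1768)) 4 x.toNat) f ∧
      mu (((M.writeLE sp 8 r).writeLE (addr (f + 1764)) 4 A).writeLE (addr (f + 1768)) 4 x.toNat) f = mu M f ∧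
      stb_vorbis.valid_bits (((M.writeLE sp 8 r).writeLE (addr (f + 1764)) 4 A).writeLE (addr (f + 1768)) 4 x.toNat) f =
        x.toInt := by
  have k1 := stack_store h sp r hlt hsp
  have k2 := acc_store k1.1 A
  have k3 := vb_store k2.1 x hx
  exact ⟨k3.1, k3.2.1.trans (k2.2.1.trans k1.2.1), k3.2.2⟩

/-- The two stores of the end-of-packet arm: a return address on the stack, `valid_bits = -1`. -/
theorem eop_stores {Blk : Block → Prop} {len : Nat} {M : Mem} {f : Nat} (h : Bits Blk len M f) (sp : Word) (r : Nat)
    (hlt : sp.toNat + 8 < 2 ^ 64) (hsp : sp.toNat + 8 ≤ f ∨ f + 1808 ≤ sp.toNat) :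
    Bits Blk len ((M.writeLE sp 8 r).writeLE (addr (f + 1768)) 4 4294967295) f ∧
      mu ((M.writeLE sp 8 r).writeLE (addr (f + 1768)) 4 4294967295) f = mu M f ∧
      stb_vorbis.valid_bits ((M.writeLE sp 8 r).writeLE (addr (f + 1768)) 4 4294967295) f = -1 := by
  have k1 := stack_store h sp r hlt hsp
  have k3 := vb_store k1.1 4294967295#32 (by decide)
  exact ⟨k3.1, k3.2.1.trans k1.2.1, k3.2.2⟩

end Vorbis.Spec.BitReader

-- The partial proof of `get_bits_24_ok` (walk, loop, call, back edge) is in /dev/shm/vorbis-user/agents/S2-6/scratch/get_bits_24_partial.lean.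

namespace Vorbis.Spec.GetBits

/-- **The stage-1 contract used AT THE SAME ENTRY STATE**: a contract `s` for the entry gives the run of a contract `s'` with a
larger frame, from one entry state `u` at which `s`'s precondition holds, provided `s`'s post gives `s'`'s there and the windows
are the same. (`Calls.weaken` restricted to one entry state.) -/
theorem reuse_at {Lay : Layout} {μ : Microarch} {I : State → Prop} {K : Conv} {entry : Word} {s s' : Spec}
    (hc : Calls Lay μ I K entry s) {u : State} {ret : Word} (he : AtEntry K entry s'.frame ret u)
    (hframe : s.frame ≤ s'.frame) (hpre : s.pre u) (hpost : ∀ v, s.post u v → s'.post u v)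
    (hwrites : s.writes u = s'.writes u) : ReachVia Lay μ I u (Returned K s' u ret) := by
  have he' : AtEntry K entry s.frame ret u :=
    ⟨he.rip, he.retAddr, he.ret_lt, he.align, Nat.le_trans (Nat.add_le_add_left hframe _) he.room, he.top, he.code, he.inv⟩
  refine (hc u ret he' hpre).mono ?_
  intro v hv
  refine ⟨hv.rip, hv.rsp, hv.saved, ?_, hv.code, hv.inv, hpost v hv.post⟩
  apply hv.same.mono
  intro w hw a h1 h2
  unfold Spec.footprint at hw
  rcases List.mem_cons.mp hw with rfl | hw
  · refine ⟨⟨(u.reg .rsp).toNat - s'.frame, (u.reg .rsp).toNat⟩, ?_, ?_, h2⟩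
    · unfold Spec.footprint
      exact List.mem_cons_self
    · show (u.reg .rsp).toNat - s'.frame ≤ a
      have : (u.reg .rsp).toNat - s.frame ≤ a := h1
      omega
  · refine ⟨w, ?_, h1, h2⟩
    unfold Spec.footprint
    rw [← hwrites]
    exact List.mem_cons_of_mem _ hw

/-- The signed value of the low half of a register (`cmp r32, …` / `jl` / `jg`), against its unsigned value. -/
theorem part32_toInt (x : Word) :
    (x.toNat % 2 ^ 32 < 2 ^ 31 ∧ (Word.part Width.w32 x).toInt = (x.toNat % 2 ^ 32 : Nat)) ∨
      (2 ^ 31 ≤ x.toNat % 2 ^ 32 ∧ (Word.part Width.w32 x).toInt = ((x.toNat % 2 ^ 32 : Nat) : Int) - 2 ^ 32) := by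
  rw [BitVec.toInt_eq_toNat_cond, Asan.part32_toNat]
  simp only [Width.bits]
  have hlt : x.toNat % 2 ^ 32 < 2 ^ 32 := Nat.mod_lt _ (by decide)
  split <;> omega

/-- A memory that agrees with `mem` on the whole of `*f` (the function's pushes, a return address): `Bits`, μ and
`valid_bits` are the same. -/
theorem obj_same {Blk : Block → Prop} {len : Nat} {mem mem1 : Mem} {f : Nat} (h : Bits Blk len mem f)
    (hE : Mem.EqOn f (f + 1808) mem mem1) :
    Bits Blk len mem1 f ∧ mu mem1 f = mu mem f ∧ stb_vorbis.valid_bits mem1 f = stb_vorbis.valid_bits mem f := by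
  have hr := h.OBR
  simp only [voff] at hr
  have hs : (objBlock f).Same mem mem1 := hE
  refine ⟨h.frame_fields (Bits.SameFields.of_same hs), mu_frame_obj (by omega) hs, ?_⟩
  simp only [vacc, voff]
  exact hE.i32 _ (by omega) (by omega) (by omega)

/-- `GetBitsPost` reads its entry memory through μ and `valid_bits` only: an entry memory that agrees on `*f` will do. -/
theorem post_of_entry_same {Blk : Block → Prop} {len : Nat} {mem mem1 mem' : Mem} {f n z : Nat} (hf : f + 1808 ≤ 2 ^ 64)
    (hE : Mem.EqOn f (f + 1808) mem mem1) (h : GetBitsPost Blk len mem1 mem' f n z) :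
    GetBitsPost Blk len mem mem' f n z := by
  have hs : (objBlock f).Same mem mem1 := hE
  have emu : mu mem1 f = mu mem f := mu_frame_obj hf hs
  have evb : stb_vorbis.valid_bits mem1 f = stb_vorbis.valid_bits mem f := by
    simp only [vacc, voff]
    exact hE.i32 _ (by omega) (by omega) (by omega)
  refine ⟨h.bits, h.result, ?_, ?_, ?_⟩
  · rw [← emu]
    exact h.mu_le
  · intro hneg
    rw [← evb, ← emu]
    apply h.eop
    rw [evb]
    exact hneg
  · intro h0 hn
    rw [← emu]
    apply h.progress _ hn
    rw [evb]
    exact h0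

/-- The arm `if (f->valid_bits < 0) return 0;`: nothing of `*f` is written. -/
theorem post_eop {Blk : Block → Prop} {len : Nat} {mem mem1 : Mem} {f : Nat} (n : Nat) (h : Bits Blk len mem f)
    (hE : Mem.EqOn f (f + 1808) mem mem1) (hneg : stb_vorbis.valid_bits mem f < 0) :
    GetBitsPost Blk len mem mem1 f n 0 := by
  obtain ⟨hb, emu, evb⟩ := obj_same h hE
  refine ⟨hb, ⟨by decide, fun _ => Nat.two_pow_pos n⟩, Nat.le_of_eq emu, ?_, ?_⟩
  · intro _
    exact ⟨rfl, evb, emu⟩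
  · intro h0 _
    omega

/-- The extraction `z = acc & mask; acc >>= n; valid_bits -= n`, reached with `1 ≤ n ≤ valid_bits`: two stores, to `acc` and
to `valid_bits`, over a memory that agrees with the entry memory on `*f`. -/
theorem post_take {Blk : Block → Prop} {len : Nat} {mem mem1 : Mem} {f n z : Nat} (h : Bits Blk len mem f)
    (hE : Mem.EqOn f (f + 1808) mem mem1) (a : Nat) (x : BitVec 32) (hn1 : 1 ≤ n)
    (hle : (n : Int) ≤ stb_vorbis.valid_bits mem f) (hx : x.toInt = stb_vorbis.valid_bits mem f - n)
    (hz : GetBitsResult n z) :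
    GetBitsPost Blk len mem ((mem1.writeLE (addr (f + 1764)) 4 a).writeLE (addr (f + 1768)) 4 x.toNat) f n z := by
  obtain ⟨hb, emu, evb⟩ := obj_same h hE
  have hV1 := h.V1
  have hb2 := hb.store_other 1764 4 a (by omega) (by omega) (by omega) (by omega) (by omega)
  have hb3 := hb2.store_valid_bits x (by omega)
  have emu2 := hb.mu_store_other 1764 4 a (by omega) (by omega) (by omega) (by omega) (by omega) (by omega)
  have emu3 := hb2.mu_store_other 1768 4 x.toNat (by omega) (by omega) (by omega) (by omega) (by omega) (by omega)
  refine ⟨hb3.1, hz, ?_, ?_, ?_⟩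
  · rw [emu3, emu2, emu]
    exact Nat.le_refl _
  · intro hneg
    omega
  · intro h0 _
    omega

/-- `valid_bits - n` as the machine forms it (`sub edx, r12d`), for `n ≤ valid_bits ≤ 32`. -/
theorem sub_toInt (a : Nat) (y : BitVec 32) (h : y.toNat ≤ a) (ha : a ≤ 32) :
    (BitVec.ofNat 32 a - y).toInt = (a : Int) - y.toNat := by
  rw [BitVec.toInt_eq_toNat_cond, BitVec.toNat_sub, BitVec.toNat_ofNat]
  split <;> omega

/-- The sign test of a 32-bit load (`test eax, eax ; js`). -/
theorem msb_ofNat32 (a : Nat) (h : a < 2 ^ 32) : (BitVec.ofNat 32 a).msb = decide (2 ^ 31 ≤ a) := by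
  rw [BitVec.msb_eq_decide, BitVec.toNat_ofNat, Nat.mod_eq_of_lt h]

/-- The whole of rax after a 32-bit operation. -/
theorem ofBV32_toNat (v : BitVec 32) : (Word.ofBV v).toNat = v.toNat := by
  rw [ofBV_eq_addr _ (by decide)]
  exact toNat_addr _ (by omega)

/-- A callee's footprint inside the caller's: the same windows of `*f`, the callee's stack window inside the caller's. -/
theorem spans_sub (w0 w0' : Span) (rest : List Span) (h1 : w0.lo ≤ w0'.lo) (h2 : w0'.hi ≤ w0.hi) :
    ∀ w ∈ w0' :: rest, ∀ a : Nat, w.lo ≤ a → a < w.hi → ∃ w' ∈ w0 :: rest, w'.lo ≤ a ∧ a < w'.hi := by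
  intro w hw a ha1 ha2
  rcases List.mem_cons.mp hw with rfl | hw
  · exact ⟨w0, List.mem_cons_self, by omega, by omega⟩
  · exact ⟨w, List.mem_cons_of_mem _ hw, ha1, ha2⟩

/-- The recursive arm's result as the machine forms it: `shl eax, 0x18 ; add eax, ebp` on two 32-bit results. -/
theorem combine_toNat (a b : Word) (ha : a.toNat < 2 ^ 32) (hb : b.toNat < 2 ^ 32) :
    (Word.ofBV (Word.part Width.w32 b <<< 24 + Word.part Width.w32 a)).toNat =
      (b.toNat * 2 ^ 24 % 2 ^ 32 + a.toNat) % 2 ^ 32 := by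
  rw [ofBV32_toNat, BitVec.toNat_add, BitVec.toNat_shiftLeft, Nat.shiftLeft_eq, Asan.part32_toNat, Asan.part32_toNat,
    Nat.mod_eq_of_lt ha, Nat.mod_eq_of_lt hb]

end Vorbis.Spec.GetBits

namespace Vorbis.Spec.ByteReader


/-- The signed value of the low half of a register is `argInt`. -/
theorem part32_toInt (x : Word) : (Word.part Width.w32 x).toInt = argInt x := by
  have h := Asan.part32_toNat x
  have hc := sint32_cases (x.toNat % 2 ^ 32)
  have hlt : x.toNat % 2 ^ 32 < 2 ^ 32 := Nat.mod_lt _ (by decide)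
  rw [argInt_def, BitVec.toInt_eq_toNat_cond, h]
  simp only [Width.bits]
  split <;> omega

/-- `movsxd r64, r32` of an `int` argument: the word of its signed value. -/
theorem sx32_eq_word (x : Word) : Word.ofBV (BitVec.signExtend 64 (Word.part Width.w32 x)) = word (argInt x) := by
  rw [ofBV_signExtend64, part32_toInt]

/-- The signed 64-bit value of a sign-extended `int` argument. -/
theorem sx32_toInt (x : Word) : (BitVec.signExtend 64 (Word.part Width.w32 x)).toInt = argInt x := by
  rw [BitVec.toInt_signExtend_of_le (by decide), part32_toInt]

/-- The signed value of a pointer difference `sub r12, rsi`. -/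
theorem sub_toInt (e s : Nat) (h : s ≤ e) (he : e < 2 ^ 63) :
    (UInt64.ofNat e - UInt64.ofNat s).toBitVec.toInt = (e : Int) - (s : Int) := by
  have e1 : UInt64.ofNat e - UInt64.ofNat s = addr (e - s) := addr_sub_addr e s h
  rw [e1, BitVec.toInt_eq_toNat_cond, UInt64.toNat_toBitVec, toNat_addr _ (by omega)]
  split <;> omega

/-- A contract with a fact `Q` about the state at the callee's entry carried from the precondition to the postcondition: the
walker forgets the argument registers of the call state, the callee's footprint and postcondition speak of them. -/
theorem calls_keep {L : Layout} {μ : Microarch} {I : State → Prop} {K : Conv} {entry : Word} {s : Spec}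
    (hc : Calls L μ I K entry s) (Q : State → Prop) :
    Calls L μ I K entry
      { pre := fun v => s.pre v ∧ Q v, post := fun v v' => s.post v v' ∧ Q v, frame := s.frame, writes := s.writes } := by
  intro v ret he hp
  refine (hc v ret ⟨he.rip, he.retAddr, he.ret_lt, he.align, he.room, he.top, he.code, he.inv⟩ hp.1).mono ?_
  intro v' hr
  exact ⟨hr.rip, hr.rsp, hr.saved, hr.same, hr.code, hr.inv, ⟨hr.post, hp.2⟩⟩

/-- **A reader moved `stream` and nothing else that `Bits` or μ read** (the rest of `*f` may have changed: getn's destination may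
be `segments[]`): `Bits` holds again and μ is the pure `muOf` with the new pointer. -/
theorem bits_stream_moved {Blk : Block → Prop} {len : Nat} {mem mem' : Mem} {f : Nat} (h : Bits Blk len mem f)
    (hE1 : Mem.EqOn (f + 56) (f + 72) mem mem') (hE2 : Mem.EqOn (f + 1488) (f + 1492) mem mem')
    (hE3 : Mem.EqOn (f + 1748) (f + 1756) mem mem') (hE4 : Mem.EqOn (f + 1768) (f + 1772) mem mem')
    (s : Nat) (es : stb_vorbis.stream mem' f = s)
    (h1 : stb_vorbis.stream_start mem f ≤ s) (h2 : s ≤ stb_vorbis.stream_end mem f) :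
    Bits Blk len mem' f ∧
      mu mem' f = muOf (stb_vorbis.stream_end mem f) s (stb_vorbis.segment_count mem f) (stb_vorbis.next_seg mem f)
        (stb_vorbis.bytes_in_seg mem f) := by
  have hr := h.OBR
  simp only [voff] at hr
  have e1 : stb_vorbis.stream_start mem' f = stb_vorbis.stream_start mem f := by
    simp only [vacc, voff]
    exact hE1.u64 _ (by omega) (by omega) (by omega)
  have e2 : stb_vorbis.stream_end mem' f = stb_vorbis.stream_end mem f := by
    simp only [vacc, voff]
    exact hE1.u64 _ (by omega) (by omega) (by omega)
  have e4 : stb_vorbis.segment_count mem' f = stb_vorbis.segment_count mem f := by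
    simp only [vacc, voff]
    exact hE2.i32 _ (by omega) (by omega) (by omega)
  have e5 : stb_vorbis.next_seg mem' f = stb_vorbis.next_seg mem f := by
    simp only [vacc, voff]
    exact hE3.i32 _ (by omega) (by omega) (by omega)
  have e6 : stb_vorbis.valid_bits mem' f = stb_vorbis.valid_bits mem f := by
    simp only [vacc, voff]
    exact hE4.i32 _ (by omega) (by omega) (by omega)
  have e7 : stb_vorbis.bytes_in_seg mem' f = stb_vorbis.bytes_in_seg mem f := by
    simp only [vacc, voff]
    exact hE3.u8 _ (by omega) (by omega) (by omega)
  constructor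
  · apply h.update e1 e2
    · rw [es]
      exact ⟨h1, h2⟩
    · rw [e4]
      exact h.N1
    · rw [e4, e5]
      exact h.N2
    · rw [e6]
      exact h.V1
  · rw [mu_def, es, e2, e4, e5, e7]

end Vorbis.Spec.ByteReader

namespace Vorbis.Spec.PacketRaw

/-- `movzx eax, byte [..] ; sub eax, 1 ; mov [..], al` stores `B − 1` when `1 ≤ B` is a byte. -/
theorem dec_byte_val (B : Nat) (h1 : 1 ≤ B) (h2 : B < 256) :
    (BitVec.setWidth 8 (BitVec.zeroExtend 32 (BitVec.ofNat 8 B) - 1#32)).toNat = B - 1 := by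
  simp only [BitVec.toNat_setWidth, BitVec.toNat_sub, BitVec.toNat_ofNat, BitVec.truncate_eq_setWidth]
  omega

/-- `movzx eax, al`: the whole of rax is a byte. -/
theorem movzx8_lt (x : Word) : (Word.ofBV (BitVec.zeroExtend 32 (Word.part .w8 x))).toNat < 256 := by
  unfold Word.ofBV Word.part
  simp only [UInt64.toNat_ofBitVec, Width.bits, BitVec.toNat_setWidth, UInt64.toNat_toBitVec, BitVec.truncate_eq_setWidth]
  omega

/-- **`valid_bits`, `acc` are outside the footprint of get8_packet_raw / flush_packet** (a stack window off `*f` and the windows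
`Reader.winsRaw f`): the `bitsSame` clause from the `same` clause. -/
theorem bitsSame_of_footprint {mem mem' : Mem} {f lo hi : Nat} (hf : f + 1808 ≤ 2 ^ 64) (hoff : hi ≤ f ∨ f + 1808 ≤ lo)
    (hs : Mem.SameExcept (⟨lo, hi⟩ :: Reader.winsRaw f) mem mem') :
    stb_vorbis.valid_bits mem' f = stb_vorbis.valid_bits mem f ∧ stb_vorbis.acc mem' f = stb_vorbis.acc mem f := by
  have e : Mem.EqOn (f + 1764) (f + 1772) mem mem' := by
    apply hs.eqOn
    intro w hw
    simp only [Reader.winsRaw, List.mem_cons, List.mem_nil_iff, or_false] at hw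
    rcases hw with rfl | rfl | rfl | rfl | rfl | rfl | rfl
    all_goals
      simp only []
      omega
  constructor
  · simp only [vacc, voff]
    exact e.i32 _ (by omega) (by omega) (by omega)
  · simp only [vacc, voff]
    exact e.u32 _ (by omega) (by omega) (by omega)

/-- **Stores that all lie in one window off `*f`** (pushes, return addresses of calls): `Bits`, μ and `bytes_in_seg` are kept. -/
theorem of_pushes {Blk : Block → Prop} {len : Nat} {mem mem' : Mem} {f lo hi : Nat} (h : Bits Blk len mem f)
    (hs : Mem.SameExcept [⟨lo, hi⟩] mem mem') (hoff : hi ≤ f ∨ f + 1808 ≤ lo) :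
    Bits Blk len mem' f ∧ mu mem' f = mu mem f ∧ stb_vorbis.bytes_in_seg mem' f = stb_vorbis.bytes_in_seg mem f := by
  have hr := h.OBR
  simp only [voff] at hr
  obtain ⟨hb, hm⟩ := Reader.reader_of_window h hs hoff
  refine ⟨hb, hm, ?_⟩
  have e : Mem.EqOn (f + 1748) (f + 1749) mem mem' := by
    apply hs.eqOn
    intro w hw
    have e : w = ⟨lo, hi⟩ := List.mem_singleton.mp hw
    subst e
    simp only []
    omega
  simp only [vacc, voff]
  exact e.u8 _ (by omega) (by omega) (by omega)

/-- **THE STRICT DECREASE (Lemma μ, case a)**: the memory at the call of get8 — `--f->bytes_in_seg` (with `1 ≤ bytes_in_seg`), the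
return address of the check, `++f->packet_bytes`, the return address of the call, the last three off what μ reads — has `Bits`
and a STRICTLY smaller μ. -/
theorem dec_chain {Blk : Block → Prop} {len : Nat} {mem : Mem} {f : Nat} (hb : Bits Blk len mem f)
    (hB : 1 ≤ stb_vorbis.bytes_in_seg mem f) (w : Word) (c1 c2 v2 : Nat) (hw : w.toNat + 8 ≤ 2 ^ 64)
    (hoff : w.toNat + 8 ≤ f ∨ f + 1808 ≤ w.toNat) :
    Bits Blk len ((((mem.writeLE (addr (f + 1748)) 1 (stb_vorbis.bytes_in_seg mem f - 1)).writeLE w 8 c1).writeLE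
        (addr (f + 1772)) 4 v2).writeLE w 8 c2) f ∧
      mu ((((mem.writeLE (addr (f + 1748)) 1 (stb_vorbis.bytes_in_seg mem f - 1)).writeLE w 8 c1).writeLE
        (addr (f + 1772)) 4 v2).writeLE w 8 c2) f < mu mem f := by
  have hlt : stb_vorbis.bytes_in_seg mem f < 2 ^ 8 := by
    simp only [vacc]
    exact Mem.u8_lt _ _
  -- `--f->bytes_in_seg`
  have b1 := hb.store_other 1748 1 (stb_vorbis.bytes_in_seg mem f - 1) (by omega) (by omega) (by omega) (by omega) (by omega)
  have m1 := hb.mu_store_bytes_in_seg (stb_vorbis.bytes_in_seg mem f - 1) (by omega)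
  have d1 := muOf_dec_byte (stb_vorbis.stream_end mem f) (stb_vorbis.stream mem f) (stb_vorbis.stream mem f)
    (stb_vorbis.segment_count mem f) (stb_vorbis.next_seg mem f) (stb_vorbis.bytes_in_seg mem f) hB (Nat.le_refl _)
  rw [← m1, ← mu_def] at d1
  -- the return address of the check call
  have k2 := Reader.store_off_obj b1 w 8 c1 hw hoff
  -- `++f->packet_bytes`
  have b3 := k2.1.bits.store_other 1772 4 v2 (by omega) (by omega) (by omega) (by omega) (by omega)
  have m3 := k2.1.bits.mu_store_other 1772 4 v2 (by omega) (by omega) (by omega) (by omega) (by omega) (by omega)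
  -- the return address of the call of get8
  have k4 := Reader.store_off_obj b3 w 8 c2 hw hoff
  refine ⟨k4.1.bits, ?_⟩
  have h2 := k2.1.mu_le
  have h4 := k4.1.mu_le
  omega

end Vorbis.Spec.PacketRaw

namespace Vorbis.Spec.Paging

/-- **What a footprint that misses every field `Bits` and μ read leaves alone**: every window is off `*f` (the caller's pushes, a
callee's stack) or inside `eof` + `error` (`[f + 136, f + 144)`: the footprint of `error`). `Bits` is kept, μ and `next_seg` are
the same. -/
theorem reader_of_footprint {Blk : Block → Prop} {len : Nat} {mem mem' : Mem} {f : Nat} {ws : List Span}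
    (h : Bits Blk len mem f) (hs : Mem.SameExcept ws mem mem')
    (hsub : ∀ w, w ∈ ws → (w.hi ≤ f ∨ f + 1808 ≤ w.lo) ∨ (f + 136 ≤ w.lo ∧ w.hi ≤ f + 144)) :
    ReaderPost Blk len mem mem' f ∧ stb_vorbis.next_seg mem' f = stb_vorbis.next_seg mem f := by
  have hr := h.OBR
  simp only [voff] at hr
  have hsf : Bits.SameFields mem mem' f := by
    apply Bits.SameFields.of_sameExcept hs
    all_goals
      intro w hw
      have := hsub w hw
      omega
  have hB : Mem.EqOn (f + 1748) (f + 1749) mem mem' := by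
    apply hs.eqOn
    intro w hw
    have := hsub w hw
    omega
  have hmu : mu mem' f = mu mem f := Reader.mu_frame_fields (by omega) hsf hB
  refine ⟨⟨h.frame_fields hsf, Nat.le_of_eq hmu⟩, ?_⟩
  simp only [vacc, voff]
  exact hsf.next_seg.i32 _ (by omega) (by omega) (by omega)

/-- The push of a return address below `*f`… or above it: one store off the object. -/
theorem push_off_obj {Blk : Block → Prop} {len : Nat} {mem : Mem} {f : Nat} (h : Bits Blk len mem f) (w : Word) (k v : Nat)
    (hw : w.toNat + k < 2 ^ 64) (hoff : w.toNat + k ≤ f ∨ f + 1808 ≤ w.toNat) :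
    ReaderPost Blk len mem (mem.writeLE w k v) f ∧
      stb_vorbis.next_seg (mem.writeLE w k v) f = stb_vorbis.next_seg mem f := by
  have hs : Mem.SameExcept [⟨w.toNat, w.toNat + k⟩] mem (mem.writeLE w k v) :=
    Mem.SameExcept.writeLE _ _ _ k v hw ⟨_, List.mem_singleton.mpr rfl, Nat.le_refl _, Nat.le_refl _⟩
  refine reader_of_footprint h hs ?_
  intro x hx
  have e : x = ⟨w.toNat, w.toNat + k⟩ := List.mem_singleton.mp hx
  subst e
  simp only []
  omega

/-- **The loop test `cmp DWORD PTR [rbx + 0x6d8], -1`** in the walker's form, as a fact about `next_seg`. -/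
theorem next_seg_test (mem : Mem) (w : Word) :
    stb_vorbis.next_seg mem w.toNat = -1 ↔ mem.readLE (w + 1752) 4 % 4294967296 = 4294967295 := by
  generalize hf : w.toNat = f
  have hr : w = addr f := eq_addr w f hf
  subst hr
  simp only [vfield, vacc, voff]
  unfold Mem.i32
  have hlt := mem.u32_lt (f + 1752)
  rcases sint32_cases (mem.u32 (f + 1752)) with h | h
  all_goals omega

/-- **The four stores of start_packet's exit** (`last_seg`, `valid_bits`, `packet_bytes`, `bytes_in_seg` := 0), from what the
final memory reads: the bytes `Bits` and μ read besides `valid_bits` and `bytes_in_seg` are the same, the four fields read 0. -/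
theorem after_stores {Blk : Block → Prop} {len : Nat} {mem mem' : Mem} {f : Nat} (w : Word) (hw : w.toNat = f)
    (h : Bits Blk len mem f)
    (hE1 : Mem.EqOn (f + 48) (f + 72) mem mem') (hE2 : Mem.EqOn (f + 1488) (f + 1492) mem mem')
    (hE3 : Mem.EqOn (f + 1752) (f + 1756) mem mem')
    (r1 : mem'.readLE (w + 1756) 4 = 0) (r2 : mem'.readLE (w + 1768) 4 = 0) (r3 : mem'.readLE (w + 1772) 4 = 0)
    (r4 : mem'.readLE (w + 1748) 1 = 0) :
    ReaderPost Blk len mem mem' f ∧ stb_vorbis.next_seg mem' f = stb_vorbis.next_seg mem f ∧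
      stb_vorbis.last_seg mem' f = 0 ∧ stb_vorbis.valid_bits mem' f = 0 ∧ stb_vorbis.packet_bytes mem' f = 0 ∧
      stb_vorbis.bytes_in_seg mem' f = 0 := by
  have hr : w = addr f := eq_addr w f hw
  subst hr
  have hobr := h.OBR
  simp only [voff] at hobr
  simp only [vfield] at r1 r2 r3 r4
  have e0 : stb_vorbis.stream mem' f = stb_vorbis.stream mem f := by
    simp only [vacc, voff]
    exact (hE1.u64 _ (by omega) (by omega) (by omega))
  have e1 : stb_vorbis.stream_start mem' f = stb_vorbis.stream_start mem f := by
    simp only [vacc, voff]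
    exact (hE1.u64 _ (by omega) (by omega) (by omega))
  have e2 : stb_vorbis.stream_end mem' f = stb_vorbis.stream_end mem f := by
    simp only [vacc, voff]
    exact (hE1.u64 _ (by omega) (by omega) (by omega))
  have e3 : stb_vorbis.segment_count mem' f = stb_vorbis.segment_count mem f := by
    simp only [vacc, voff]
    exact (hE2.i32 _ (by omega) (by omega) (by omega))
  have e4 : stb_vorbis.next_seg mem' f = stb_vorbis.next_seg mem f := by
    simp only [vacc, voff]
    exact (hE3.i32 _ (by omega) (by omega) (by omega))
  have v1 : stb_vorbis.last_seg mem' f = 0 := by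
    simp only [vacc, voff]
    unfold Mem.i32
    rw [r1]
    rfl
  have v2 : stb_vorbis.valid_bits mem' f = 0 := by
    simp only [vacc, voff]
    unfold Mem.i32
    rw [r2]
    rfl
  have v3 : stb_vorbis.packet_bytes mem' f = 0 := by
    simp only [vacc, voff]
    unfold Mem.i32
    rw [r3]
    rfl
  have v4 : stb_vorbis.bytes_in_seg mem' f = 0 := by
    simp only [vacc, voff]
    exact r4
  refine ⟨⟨?_, ?_⟩, e4, v1, v2, v3, v4⟩
  · apply h.update e1 e2
    · rw [e0]
      exact h.S3
    · rw [e3]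
      exact h.N1
    · rw [e3, e4]
      exact h.N2
    · rw [v2]
      omega
  · rw [mu_def, mu_def, e0, e2, e3, e4, v4]
    exact muOf_set_B_zero _ _ _ _ _

end Vorbis.Spec.Paging

namespace Vorbis.Spec.PrepHuffman

/-- A memory that agrees with `mem` on the whole of `*f` (the function's pushes, a return address): `Bits`, μ, `valid_bits`
and `acc` are the same. -/
theorem obj_same {Blk : Block → Prop} {len : Nat} {mem mem1 : Mem} {f : Nat} (h : Bits Blk len mem f)
    (hE : Mem.EqOn f (f + 1808) mem mem1) :
    Bits Blk len mem1 f ∧ mu mem1 f = mu mem f ∧ stb_vorbis.valid_bits mem1 f = stb_vorbis.valid_bits mem f ∧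
      stb_vorbis.acc mem1 f = stb_vorbis.acc mem f := by
  have hr := h.OBR
  simp only [voff] at hr
  have hs : (objBlock f).Same mem mem1 := hE
  refine ⟨h.frame_fields (Bits.SameFields.of_same hs), mu_frame_obj (by omega) hs, ?_, ?_⟩
  · simp only [vacc, voff]
    exact hE.i32 _ (by omega) (by omega) (by omega)
  · simp only [vacc, voff]
    exact hE.u32 _ (by omega) (by omega) (by omega)


/-- The store `f->acc = 0` over a memory that agrees with `mem` on `*f` (the pushes, a return address): `Bits`, μ, `valid_bits`
as in `mem`. -/
theorem acc_store_over {Blk : Block → Prop} {len : Nat} {mem M : Mem} {f : Nat} (h : Bits Blk len mem f)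
    (hE : Mem.EqOn f (f + 1808) mem M) (A : Nat) :
    Bits Blk len (M.writeLE (addr (f + 1764)) 4 A) f ∧ mu (M.writeLE (addr (f + 1764)) 4 A) f = mu mem f ∧
      stb_vorbis.valid_bits (M.writeLE (addr (f + 1764)) 4 A) f = stb_vorbis.valid_bits mem f := by
  obtain ⟨hb, emu, evb, _⟩ := obj_same h hE
  have k := Vorbis.Spec.BitReader.acc_store hb A
  exact ⟨k.1, k.2.1.trans emu, k.2.2.trans evb⟩

/-- `add ecx, 8` on `valid_bits ≤ 24`: no wrap. -/
theorem vb_add8 : ∀ m : Nat, m ≤ 24 → (BitVec.ofNat 32 m + 8#32).toInt = (m : Int) + 8 := by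
  decide

/-- `valid_bits` as the 32-bit load the stepper makes, against the signed field. -/
theorem vb_cases (mem : Mem) (f m : Nat) (h : mem.readLE (addr f + 1768) 4 = m) :
    (m < 2147483648 ∧ stb_vorbis.valid_bits mem f = (m : Int)) ∨
      (2147483648 ≤ m ∧ m < 4294967296 ∧ stb_vorbis.valid_bits mem f = (m : Int) - 4294967296) := by
  have e : mem.u32 (f + 1768) = m := by
    rw [← h]
    simp only [vfield]
  have hc := mem.i32_cases (f + 1768)
  simp only [vacc, voff]
  rw [e] at hc
  exact hc

end Vorbis.Spec.PrepHuffman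

namespace Vorbis.Spec.Segment

/-- The low 32 bits of a small number's word. -/
theorem part32_addr (n : Nat) (h : n < 2 ^ 32) : Word.part Width.w32 (addr n) = BitVec.ofNat 32 n := by
  apply BitVec.eq_of_toNat_eq
  rw [Asan.part32_toNat, toNat_addr n (by omega), BitVec.toNat_ofNat]

/-- A 32-bit register write of a small number. -/
theorem ofBV_ofNat32 (n : Nat) (h : n < 2 ^ 32) : Word.ofBV (BitVec.ofNat 32 n) = addr n := by
  rw [ofBV_eq_addr _ (by decide), BitVec.toNat_ofNat, Nat.mod_eq_of_lt h]

/-- `movsxd` of a small non-negative number. -/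
theorem sx_ofNat32 (n : Nat) (h : n < 2 ^ 31) : Word.ofBV (BitVec.signExtend 64 (BitVec.ofNat 32 n)) = addr n := by
  rw [ofBV_signExtend64, toInt_ofNat32 n (by omega)]
  have hc := sint32_cases n
  have e : sint32 n = (n : Int) := by omega
  rw [e, word_nonneg _ (by omega)]
  rfl

/-- `lea r14d, [r12 + 1]` of a small number. -/
theorem setWidth_succ (n : Nat) (h : n + 1 < 2 ^ 32) :
    BitVec.setWidth 32 (addr n + 1).toBitVec = BitVec.ofNat 32 (n + 1) := by
  apply BitVec.eq_of_toNat_eq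
  have e : (addr n + 1).toNat = n + 1 := by
    rw [addr_add_lit, toNat_addr _ (by omega)]
  rw [BitVec.toNat_setWidth, UInt64.toNat_toBitVec, e, BitVec.toNat_ofNat]

/-- `movzx r13d, BYTE PTR …` of a byte. -/
theorem zx8_ofNat (l : Nat) (h : l < 256) : BitVec.zeroExtend 32 (BitVec.ofNat 8 l) = BitVec.ofNat 32 l := by
  apply BitVec.eq_of_toNat_eq
  rw [BitVec.toNat_setWidth, BitVec.toNat_ofNat, BitVec.toNat_ofNat]
  omega

/-- The low byte of a byte. -/
theorem low8_ofNat (l : Nat) (h : l < 256) : BitVec.setWidth 8 (BitVec.ofNat 32 l) = BitVec.ofNat 8 l := by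
  apply BitVec.eq_of_toNat_eq
  rw [BitVec.toNat_setWidth, BitVec.toNat_ofNat, BitVec.toNat_ofNat]
  omega

/-- The low byte of a byte's word (`movzx ebp, r13b`, `mov BYTE PTR …, r13b`). -/
theorem part8_addr (l : Nat) (h : l < 256) : Word.part Width.w8 (addr l) = BitVec.ofNat 8 l := by
  rw [Word.part8_eq_part32, part32_addr l (by omega), low8_ofNat l h]

/-- The signed value of a small 32-bit number. -/
theorem toInt_small (n : Nat) (h : n < 2 ^ 31) : (BitVec.ofNat 32 n).toInt = (n : Int) := by
  rw [toInt_ofNat32 n (by omega)]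
  have hc := sint32_cases n
  omega

/-- `next_seg` from the four bytes read at `[f + 1752]`. -/
theorem next_seg_of_read (mem : Mem) (f x : Nat) (h : mem.readLE (addr f + 1752) 4 = x) :
    stb_vorbis.next_seg mem f = sint32 x := by
  simp only [vfield] at h
  simp only [vacc, voff]
  rw [Mem.i32_def, h]

/-- `bytes_in_seg` from the byte read at `[f + 1748]`. -/
theorem bytes_in_seg_of_read (mem : Mem) (f x : Nat) (h : mem.readLE (addr f + 1748) 1 = x) :
    stb_vorbis.bytes_in_seg mem f = x := by
  simp only [vfield] at h
  simp only [vacc, voff]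
  exact h

/-- **The memory after the segment read**: `stream…`, `segment_count`, `valid_bits` as before; `next_seg` is the entry value `+ 1`
if that is below `segment_count`, else `−1`; `bytes_in_seg` is a byte. `Bits` holds again (N2 is re-proved HERE, for the final
value of `next_seg`) and μ is strictly smaller. -/
theorem segment_post {Blk : Block → Prop} {len : Nat} {m0 m M : Mem} {f n c x l : Nat}
    (hb : Bits Blk len m f) (hmu : mu m f ≤ mu m0 f)
    (hn : stb_vorbis.next_seg m f = (n : Int)) (hc : stb_vorbis.segment_count m f = (c : Int))
    (hE1 : Mem.EqOn (f + 48) (f + 72) m M) (hE2 : Mem.EqOn (f + 1488) (f + 1492) m M)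
    (hE3 : Mem.EqOn (f + 1768) (f + 1772) m M)
    (hns : M.readLE (addr f + 1752) 4 = x) (hx : (n + 1 < c ∧ x = n + 1) ∨ (c ≤ n + 1 ∧ x = 4294967295))
    (hbs : M.readLE (addr f + 1748) 1 = l) (hl : l < 256) :
    Bits Blk len M f ∧ mu M f < mu m0 f ∧ stb_vorbis.bytes_in_seg M f = l := by
  have hr := hb.OBR
  simp only [voff] at hr
  have hN1 := hb.N1
  have e1 : stb_vorbis.stream_start M f = stb_vorbis.stream_start m f := by
    simp only [vacc, voff]
    exact hE1.u64 _ (by omega) (by omega) (by omega)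
  have e2 : stb_vorbis.stream_end M f = stb_vorbis.stream_end m f := by
    simp only [vacc, voff]
    exact hE1.u64 _ (by omega) (by omega) (by omega)
  have e3 : stb_vorbis.stream M f = stb_vorbis.stream m f := by
    simp only [vacc, voff]
    exact hE1.u64 _ (by omega) (by omega) (by omega)
  have e4 : stb_vorbis.segment_count M f = stb_vorbis.segment_count m f := by
    simp only [vacc, voff]
    exact hE2.i32 _ (by omega) (by omega) (by omega)
  have e6 : stb_vorbis.valid_bits M f = stb_vorbis.valid_bits m f := by
    simp only [vacc, voff]
    exact hE3.i32 _ (by omega) (by omega) (by omega)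
  have e7 : stb_vorbis.bytes_in_seg M f = l := bytes_in_seg_of_read M f l hbs
  -- the new `next_seg` is `nextSeg` of the old one
  have e5 : stb_vorbis.next_seg M f = nextSeg (stb_vorbis.next_seg m f) (stb_vorbis.segment_count m f) := by
    rw [next_seg_of_read M f x hns, hn, hc]
    have hs := sint32_cases x
    have hk := nextSeg_cases (n : Int) (c : Int)
    omega
  have hne : stb_vorbis.next_seg m f ≠ -1 := by omega
  refine ⟨?_, ?_, e7⟩
  · apply hb.update e1 e2
    · rw [e3]
      exact hb.S3
    · rw [e4]
      exact hb.N1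
    · rw [e4, e5]
      exact nextSeg_N2 _ _ hb.N2 hne
    · rw [e6]
      exact hb.V1
  · apply Nat.lt_of_lt_of_le ?_ hmu
    rw [mu_def, mu_def, e2, e3, e4, e5, e7]
    exact muOf_next_segment _ _ _ _ _ _ l hne (by omega) (Nat.le_refl _)

/-- Window inclusion, window by window, in the form `Mem.SameExcept.step_same` / `.mono` ask for. -/
theorem spans_sub {ws ws' : List Span} (h : ∀ w ∈ ws', InSpans ws w.lo (w.hi - w.lo)) :
    ∀ w ∈ ws', ∀ a : Nat, w.lo ≤ a → a < w.hi → ∃ w' ∈ ws, w'.lo ≤ a ∧ a < w'.hi := by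
  intro w hw a h1 h2
  obtain ⟨w', hw', h3, h4⟩ := h w hw
  exact ⟨w', hw', by omega, by omega⟩

/-- **Stores that miss every byte `Bits` and μ read** (a callee's or the function's own footprint, as `Mem.SameExcept`): `Bits`, μ,
`next_seg` and `bytes_in_seg` are kept. -/
theorem kept_of_sameExcept {Blk : Block → Prop} {len : Nat} {ws : List Span} {m M : Mem} {f : Nat} (hb : Bits Blk len m f)
    (hs : Mem.SameExcept ws m M)
    (hoff : ∀ w, w ∈ ws → w.hi ≤ f + 48 ∨ (f + 72 ≤ w.lo ∧ w.hi ≤ f + 1488) ∨ (f + 1492 ≤ w.lo ∧ w.hi ≤ f + 1748) ∨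
      (f + 1756 ≤ w.lo ∧ w.hi ≤ f + 1768) ∨ f + 1772 ≤ w.lo) :
    Bits Blk len M f ∧ mu M f = mu m f ∧ stb_vorbis.next_seg M f = stb_vorbis.next_seg m f ∧
      stb_vorbis.bytes_in_seg M f = stb_vorbis.bytes_in_seg m f := by
  have hr := hb.OBR
  simp only [voff] at hr
  have hE1 : Mem.EqOn (f + 48) (f + 72) m M := by
    apply hs.eqOn
    intro w hw
    have := hoff w hw
    omega
  have hE2 : Mem.EqOn (f + 1488) (f + 1492) m M := by
    apply hs.eqOn
    intro w hw
    have := hoff w hw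
    omega
  have hE3 : Mem.EqOn (f + 1752) (f + 1756) m M := by
    apply hs.eqOn
    intro w hw
    have := hoff w hw
    omega
  have hE4 : Mem.EqOn (f + 1768) (f + 1772) m M := by
    apply hs.eqOn
    intro w hw
    have := hoff w hw
    omega
  have hE5 : Mem.EqOn (f + 1748) (f + 1749) m M := by
    apply hs.eqOn
    intro w hw
    have := hoff w hw
    omega
  refine ⟨hb.frame_fields ⟨hE1, hE2, hE3, hE4⟩, mu_frame (by omega) hE1 hE2 hE3 hE5, ?_, ?_⟩
  · simp only [vacc, voff]
    exact hE3.i32 _ (by omega) (by omega) (by omega)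
  · simp only [vacc, voff]
    exact hE5.u8 _ (by omega) (by omega) (by omega)

/-- `bytes_in_seg` across a footprint that misses it (start_page's, error's). -/
theorem bytes_in_seg_of_sameExcept {ws : List Span} {m M : Mem} {f : Nat} (hf : f + 1808 ≤ 2 ^ 64)
    (hs : Mem.SameExcept ws m M) (hoff : ∀ w, w ∈ ws → w.hi ≤ f + 1748 ∨ f + 1749 ≤ w.lo) :
    stb_vorbis.bytes_in_seg M f = stb_vorbis.bytes_in_seg m f := by
  have hE5 : Mem.EqOn (f + 1748) (f + 1749) m M := by
    apply hs.eqOn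
    intro w hw
    have := hoff w hw
    omega
  simp only [vacc, voff]
  exact hE5.u8 _ (by omega) (by omega) (by omega)

/-- `last_seg` from the four bytes read at `[f + 1756]`. -/
theorem last_seg_of_read (mem : Mem) (f x : Nat) (h : mem.readLE (addr f + 1756) 4 = x) :
    stb_vorbis.last_seg mem f = sint32 x := by
  simp only [vfield] at h
  simp only [vacc, voff]
  rw [Mem.i32_def, h]

/-- `test eax, eax` on start_page's result (0 or 1). -/
theorem rax_of_test (r : Word) (h : r = 0 ∨ r = 1) :
    ((Word.part Width.w32 r).toNat = 0 → r = 0) ∧ (¬ (Word.part Width.w32 r).toNat = 0 → r = 1) := by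
  rcases h with rfl | rfl
  · constructor
    · intro _
      rfl
    · intro hn
      rw [Asan.part32_toNat] at hn
      exact absurd (by decide) hn
  · constructor
    · intro hz
      rw [Asan.part32_toNat] at hz
      exact absurd hz (by decide)
    · intro _
      rfl

/-- `mov eax, ebp` with `ebp = 0`. -/
theorem ofBV_part32_zero : Word.ofBV (Word.part Width.w32 (0 : Word)) = 0 := by
  rw [ofBV_eq_addr _ (by decide), Asan.part32_toNat]
  rfl

end Vorbis.Spec.Segment

namespace Vorbis.Spec.MaybeStart

/-- **`Bits` and μ through a footprint that misses every field they read** (`error`'s: its stack and `[f+140, f+144)`). -/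
theorem reader_through {Blk : Block → Prop} {len : Nat} {mem mem' : Mem} {f : Nat} {ws : List Span} (h : Bits Blk len mem f)
    (hs : Mem.SameExcept ws mem mem')
    (hmiss : ∀ w, w ∈ ws → (w.hi ≤ f + 48 ∨ f + 72 ≤ w.lo) ∧ (w.hi ≤ f + 1488 ∨ f + 1492 ≤ w.lo) ∧
      (w.hi ≤ f + 1748 ∨ f + 1749 ≤ w.lo) ∧ (w.hi ≤ f + 1752 ∨ f + 1756 ≤ w.lo) ∧ (w.hi ≤ f + 1768 ∨ f + 1772 ≤ w.lo)) :
    Bits Blk len mem' f ∧ mu mem' f = mu mem f := by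
  have hr := h.OBR
  simp only [voff] at hr
  have hsf : Bits.SameFields mem mem' f := by
    apply Bits.SameFields.of_sameExcept hs
    all_goals
      intro w hw
      have := hmiss w hw
      omega
  have hB : Mem.EqOn (f + 1748) (f + 1749) mem mem' := by
    apply hs.eqOn
    intro w hw
    have := hmiss w hw
    omega
  exact ⟨h.frame_fields hsf, Reader.mu_frame_fields (by omega) hsf hB⟩

/-- `error(f, e)`'s footprint keeps `Bits` and μ. -/
theorem reader_through_error {Blk : Block → Prop} {len : Nat} {mem mem' : Mem} {f lo hi : Nat} (h : Bits Blk len mem f)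
    (hs : Mem.SameExcept [⟨lo, hi⟩, ⟨f + 140, f + 140 + 4⟩] mem mem') (hoff : hi ≤ f ∨ f + 1808 ≤ lo) :
    Bits Blk len mem' f ∧ mu mem' f = mu mem f := by
  apply reader_through h hs
  intro w hw
  simp only [List.mem_cons, List.mem_nil_iff, or_false] at hw
  rcases hw with rfl | rfl
  · simp only []
    omega
  · simp only []
    omega

/-- **The function's own two stores on the continued-flag arm**: `last_seg := 0` (`[f+1756, f+1760)`), `bytes_in_seg := 0`
(`[f+1748]`): `Bits` kept, μ not increased. -/
theorem own_stores {Blk : Block → Prop} {len : Nat} {mem : Mem} {f : Nat} (h : Bits Blk len mem f) :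
    Bits Blk len ((mem.writeLE (addr (f + 1756)) 4 0).writeLE (addr (f + 1748)) 1 0) f ∧
      mu ((mem.writeLE (addr (f + 1756)) 4 0).writeLE (addr (f + 1748)) 1 0) f ≤ mu mem f := by
  have b1 := h.store_other 1756 4 0 (by omega) (by omega) (by omega) (by omega) (by omega)
  have m1 := h.mu_store_other 1756 4 0 (by omega) (by omega) (by omega) (by omega) (by omega) (by omega)
  have b2 := b1.store_other 1748 1 0 (by omega) (by omega) (by omega) (by omega) (by omega)
  have m2 := b1.mu_store_bytes_in_seg 0 (by omega)
  refine ⟨b2, ?_⟩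
  rw [m2, ← m1, mu_def (mem.writeLE (addr (f + 1756)) 4 0) f]
  exact muOf_set_B_zero _ _ _ _ _

/-- **μ on the page arm**: four get8 that each really advanced, then start_page_no_capturepattern's bound. -/
theorem mu_page_arm (m0 m1 m2 m3 m4 m5 : Nat) (c : Nat) (a1 : m1 + 65536 ≤ m0) (a2 : m2 + 65536 ≤ m1) (a3 : m3 + 65536 ≤ m2)
    (a4 : m4 + 65536 ≤ m3) (hb : m5 + 65536 * c ≤ m4 + 255 * 256) : m5 < m0 := by
  omega

/-- The footprint of the byte readers and `error` inside the function's own. -/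
theorem widen {m0 m : Mem} {lo hi f : Nat}
    (h : Mem.SameExcept [⟨lo, hi⟩, ⟨f + 48, f + 56⟩, ⟨f + 136, f + 144⟩] m0 m) :
    Mem.SameExcept [⟨lo, hi⟩, ⟨f + 48, f + 56⟩, ⟨f + 84, f + 96⟩, ⟨f + 136, f + 144⟩, ⟨f + 1484, f + 1749⟩,
      ⟨f + 1752, f + 1760⟩, ⟨f + 1768, f + 1784⟩] m0 m := by
  apply h.mono
  intro w hw a h1 h2
  simp only [List.mem_cons, List.mem_nil_iff, or_false] at hw
  rcases hw with rfl | rfl | rfl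
  · exact ⟨⟨lo, hi⟩, by simp, h1, h2⟩
  · exact ⟨⟨f + 48, f + 56⟩, by simp, h1, h2⟩
  · exact ⟨⟨f + 136, f + 144⟩, by simp, h1, h2⟩

/-- `next_seg` through the footprint of the byte readers and `error`. -/
theorem next_seg_kept {m0 m : Mem} {lo hi f : Nat} (hf : f + 1808 ≤ 2 ^ 64)
    (h : Mem.SameExcept [⟨lo, hi⟩, ⟨f + 48, f + 56⟩, ⟨f + 136, f + 144⟩] m0 m) (hoff : hi ≤ f ∨ f + 1808 ≤ lo) :
    stb_vorbis.next_seg m f = stb_vorbis.next_seg m0 f := by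
  refine (Reader.kept_of_callee hf h ?_).1
  intro w hw
  simp only [List.mem_cons, List.mem_nil_iff, or_false] at hw
  rcases hw with rfl | rfl | rfl
  · left
    simp only []
    omega
  · right
    left
    simp only []
    omega
  · right
    right
    left
    simp only []
    omega

/-- **The function's own stores on the continued-flag arm as a footprint**: stack stores, `last_seg` (`[f+1756, f+1760)`),
`bytes_in_seg := 0` (`[f+1748]`): `Bits` kept, μ not increased. -/
theorem reader_through_own {Blk : Block → Prop} {len : Nat} {mem mem' : Mem} {f lo hi : Nat} (h : Bits Blk len mem f)
    (hs : Mem.SameExcept [⟨lo, hi⟩, ⟨f + 1748, f + 1749⟩, ⟨f + 1756, f + 1760⟩] mem mem') (hoff : hi ≤ f ∨ f + 1808 ≤ lo)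
    (hz : stb_vorbis.bytes_in_seg mem' f = 0) : Bits Blk len mem' f ∧ mu mem' f ≤ mu mem f := by
  have hr := h.OBR
  simp only [voff] at hr
  have hsf : Bits.SameFields mem mem' f := by
    apply Bits.SameFields.of_sameExcept hs
    all_goals
      intro w hw
      simp only [List.mem_cons, List.mem_nil_iff, or_false] at hw
      rcases hw with rfl | rfl | rfl
      all_goals
        simp only []
        omega
  have e1 : stb_vorbis.stream_end mem' f = stb_vorbis.stream_end mem f := by
    simp only [vacc, voff]
    exact hsf.streams.u64 _ (by omega) (by omega) (by omega)
  have e2 : stb_vorbis.stream mem' f = stb_vorbis.stream mem f := by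
    simp only [vacc, voff]
    exact hsf.streams.u64 _ (by omega) (by omega) (by omega)
  have e3 : stb_vorbis.segment_count mem' f = stb_vorbis.segment_count mem f := by
    simp only [vacc, voff]
    exact hsf.segment_count.i32 _ (by omega) (by omega) (by omega)
  have e4 : stb_vorbis.next_seg mem' f = stb_vorbis.next_seg mem f := by
    simp only [vacc, voff]
    exact hsf.next_seg.i32 _ (by omega) (by omega) (by omega)
  refine ⟨h.frame_fields hsf, ?_⟩
  rw [mu_def, mu_def, e1, e2, e3, e4, hz]
  exact muOf_set_B_zero _ _ _ _ _

end Vorbis.Spec.MaybeStart
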